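-- pv_equiv track=rewrite | github.com/issdandavis/SCBE-AETHERMOORE | agents/obsidian_researcher/sources/brainstorm_source.py | _structure_idea
-- ===== SOURCE A (Python) =====
-- from typing import Any, Dict, List, Optional
--
-- def _structure_idea(text: str) -> Dict[str, Any]:
--     """Extract structured sections from free-form brainstorm text.
--
--     Recognised markers:
--
--     * **Problem statement** -- lines starting with ``Problem:``
--       (case-insensitive).
--     * **Direction / approach** -- everything that is not a problem
--       statement or open question.
--     * **Open questions** -- lines starting with ``?`` or
--       ``Question:`` (case-insensitive).
--
--     Returns a dict with keys ``problem_statements``,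
--     ``directions``, and ``open_questions`` (each a list of strings).
--     """
--     problem_statements: List[str] = []
--     open_questions: List[str] = []
--     directions: List[str] = []
--
--     for raw_line in text.splitlines():
--         line = raw_line.strip()
--         if not line:
--             continue
--
--         lower = line.lower()
--
--         # Problem statement
--         if lower.startswith("problem:"):
--             problem_statements.append(line[len("problem:"):].strip())
--         # Open questions
--         elif lower.startswith("question:"):
--             open_questions.append(line[len("question:"):].strip())
--         elif line.startswith("?"):
--             question_text = line[1:].strip()
--             if question_text:
--                 open_questions.append(question_text)
--         else:
--             directions.append(line)
--
--     return {
--         "problem_statements": problem_statements,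
--         "directions": directions,
--         "open_questions": open_questions,
--     }
-- ===== SOURCE B (Python) =====
-- def _structure_idea(text):
--     """Same sections as A, computed by three independent filters over the
--     stripped non-empty lines instead of one classifying loop."""
--     lines = [s for s in (raw.strip() for raw in text.splitlines()) if s]
--
--     def prob(l):
--         return l[8:].strip() if l.lower().startswith("problem:") else None
--
--     def quest(l):
--         if l.lower().startswith("question:"):
--             return l[9:].strip()
--         if l.startswith("?"):
--             return l[1:].strip() or None
--         return None
--
--     return {
--         "problem_statements": [p for p in map(prob, lines) if p is not None],
--         "directions": [l for l in lines
--                        if prob(l) is None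
--                        and not l.lower().startswith("question:")
--                        and not l.startswith("?")],
--         "open_questions": [q for q in map(quest, lines) if q is not None],
--     }
-- ===== Notes on version B (the rewrite author's own statement) =====
-- stated objective: alternative
-- what changed: Replaces the single classifying loop with three accumulators by three independent filter/filterMap passes over the stripped non-empty lines, one per output category.
import Mathlib
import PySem

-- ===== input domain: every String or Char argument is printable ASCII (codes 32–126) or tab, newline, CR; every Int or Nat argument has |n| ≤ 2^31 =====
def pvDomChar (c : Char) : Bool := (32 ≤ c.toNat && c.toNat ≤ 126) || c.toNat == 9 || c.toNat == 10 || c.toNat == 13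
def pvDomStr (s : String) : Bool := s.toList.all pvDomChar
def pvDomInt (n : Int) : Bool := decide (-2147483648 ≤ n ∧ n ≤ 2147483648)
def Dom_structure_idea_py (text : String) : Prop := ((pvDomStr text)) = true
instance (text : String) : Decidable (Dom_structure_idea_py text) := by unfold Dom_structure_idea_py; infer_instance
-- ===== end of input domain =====

-- B replaces A's single classifying loop by three independent filter passes over the stripped
-- non-empty lines (alternative decomposition, same O(n) cost).

-- ===== PORT A =====
-- one step of A's loop over raw lines; state = (problem_statements, open_questions, directions)
def aStep (acc : List String × List String × List String) (raw : String) :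
    List String × List String × List String :=
  let line := PySem.Str.strip raw
  if line = "" then acc
  else
    let lower := PySem.Str.lower line
    if PySem.Str.startswith lower "problem:" then
      (acc.1 ++ [PySem.Str.strip (PySem.Str.slice line (some 8) none)], acc.2.1, acc.2.2)
    else if PySem.Str.startswith lower "question:" then
      (acc.1, acc.2.1 ++ [PySem.Str.strip (PySem.Str.slice line (some 9) none)], acc.2.2)
    else if PySem.Str.startswith line "?" then
      let question_text := PySem.Str.strip (PySem.Str.slice line (some 1) none)
      if question_text = "" then acc
      else (acc.1, acc.2.1 ++ [question_text], acc.2.2)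
    else (acc.1, acc.2.1, acc.2.2 ++ [line])

def structure_idea_py (text : String) : List (String × List String) :=
  let r := (PySem.Str.splitlines text).foldl aStep ([], [], [])
  [("problem_statements", r.1), ("directions", r.2.2), ("open_questions", r.2.1)]

-- ===== PORT B =====
-- Source B's helper prob(l)
def bProb (l : String) : Option String :=
  if PySem.Str.startswith (PySem.Str.lower l) "problem:" then
    some (PySem.Str.strip (PySem.Str.slice l (some 8) none))
  else none

-- Source B's helper quest(l)
def bQuest (l : String) : Option String :=
  if PySem.Str.startswith (PySem.Str.lower l) "question:" then
    some (PySem.Str.strip (PySem.Str.slice l (some 9) none))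
  else if PySem.Str.startswith l "?" then
    (if PySem.Str.strip (PySem.Str.slice l (some 1) none) = "" then none
     else some (PySem.Str.strip (PySem.Str.slice l (some 1) none)))
  else none

def structure_idea_py_alt (text : String) : List (String × List String) :=
  let lines := ((PySem.Str.splitlines text).map PySem.Str.strip).filter (fun l => l != "")
  [("problem_statements", lines.filterMap bProb),
   ("directions", lines.filter (fun l =>
      (bProb l).isNone
        && !(PySem.Str.startswith (PySem.Str.lower l) "question:")
        && !(PySem.Str.startswith l "?"))),
   ("open_questions", lines.filterMap bQuest)]

-- ===== PRECONDITION & SPEC =====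
def Spec_structure_idea_py (text : String) (out : List (String × List String)) : Prop := out = structure_idea_py_alt text
instance (text : String) (out : List (String × List String)) : Decidable (Spec_structure_idea_py text out) := by unfold Spec_structure_idea_py; infer_instance

-- ===== CLAIM (what is proved, stated in full; the proofs are below) =====
def Claim_equal_structure_idea_py : Prop := ∀ (text : String), Dom_structure_idea_py text → Spec_structure_idea_py text (structure_idea_py text)

-- ===== LEMMAS AND PROOFS =====

lemma not_quest_of_prob (l : String)
    (hp : PySem.Str.startswith (PySem.Str.lower l) "problem:" = true) :
    PySem.Str.startswith (PySem.Str.lower l) "question:" = false := by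
  by_contra h
  rw [Bool.not_eq_false] at h
  simp only [PySem.Str.startswith] at hp h
  rw [PySem.Chars.startswith_iff] at hp h
  obtain ⟨t, ht⟩ := hp
  rw [← ht] at h
  rw [show ("problem:".toList) = ['p','r','o','b','l','e','m',':'] from rfl,
      show ("question:".toList) = ['q','u','e','s','t','i','o','n',':'] from rfl] at h
  simp [List.cons_prefix_cons] at h

lemma not_qmark_of_prob (l : String)
    (hp : PySem.Str.startswith (PySem.Str.lower l) "problem:" = true) :
    PySem.Str.startswith l "?" = false := by
  by_contra h
  rw [Bool.not_eq_false] at h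
  simp only [PySem.Str.startswith] at hp h
  rw [PySem.Chars.startswith_iff] at hp h
  obtain ⟨t, ht⟩ := h
  have hl : (PySem.Str.lower l).toList = ("?".toList ++ t).map PySem.Chars.lowerChar := by
    rw [PySem.Str.toList_lower, ← ht]
    simp [PySem.Chars.lower]
  rw [hl] at hp
  rw [show ("problem:".toList) = ['p','r','o','b','l','e','m',':'] from rfl,
      show ("?".toList) = ['?'] from rfl] at hp
  simp [List.cons_prefix_cons] at hp
  exact absurd hp.1 (by decide)

-- A's loop from any accumulators = those accumulators extended by B's three filters
lemma foldA (raws : List String) (ps qs ds : List String) :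
    raws.foldl aStep (ps, qs, ds) =
      (ps ++ (((raws.map PySem.Str.strip).filter (fun l => l != "")).filterMap bProb),
       qs ++ (((raws.map PySem.Str.strip).filter (fun l => l != "")).filterMap bQuest),
       ds ++ (((raws.map PySem.Str.strip).filter (fun l => l != "")).filter (fun l =>
          (bProb l).isNone
            && !(PySem.Str.startswith (PySem.Str.lower l) "question:")
            && !(PySem.Str.startswith l "?")))) := by
  induction raws generalizing ps qs ds with
  | nil => simp
  | cons raw rest ih =>
    simp only [List.foldl_cons, List.map_cons, List.filter_cons]
    by_cases h0 : PySem.Str.strip raw = ""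
    · simp only [aStep, h0, if_true]
      simp [ih]
    · simp only [bne_iff_ne, ne_eq, h0, not_false_eq_true, if_true,
        List.filterMap_cons, List.filter_cons]
      set line := PySem.Str.strip raw with hline
      by_cases hp : PySem.Str.startswith (PySem.Str.lower line) "problem:" = true
      · have hq := not_quest_of_prob line hp
        have hm := not_qmark_of_prob line hp
        simp only [aStep, ← hline, if_neg h0, hp, if_true]
        rw [ih]
        simp at hp hq hm
        simp [bProb, bQuest, hp, hq, hm]
      · by_cases hq : PySem.Str.startswith (PySem.Str.lower line) "question:" = true
        · simp only [aStep, ← hline, if_neg h0, hp, if_false, hq, if_true, Bool.false_eq_true]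
          rw [ih]
          simp only [Bool.not_eq_true] at hp
          simp at hp hq
          simp [bProb, bQuest, hp, hq]
        · by_cases hm : PySem.Str.startswith line "?" = true
          · by_cases he : PySem.Str.strip (PySem.Str.slice line (some 1) none) = ""
            · simp only [aStep, ← hline, if_neg h0, hp, hq, hm, he, Bool.false_eq_true,
                if_false, if_true]
              rw [ih]
              simp only [Bool.not_eq_true] at hp hq
              simp at hp hq hm
              simp [bProb, bQuest, hp, hq, hm, he]
            · simp only [aStep, ← hline, if_neg h0, hp, hq, hm, he, Bool.false_eq_true,
                if_false, if_true]
              rw [ih]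
              simp only [Bool.not_eq_true] at hp hq
              simp at hp hq hm
              simp [bProb, bQuest, hp, hq, hm, he]
          · simp only [aStep, ← hline, if_neg h0, hp, hq, hm, Bool.false_eq_true, if_false]
            rw [ih]
            simp only [Bool.not_eq_true] at hp hq hm
            simp at hp hq hm
            simp [bProb, bQuest, hp, hq, hm]

-- ===== VERDICT (by name: the statement is the Claim_ definition above) =====
theorem structure_idea_py_spec : Claim_equal_structure_idea_py := by
  intro text _
  unfold Spec_structure_idea_py structure_idea_py structure_idea_py_alt
  rw [foldA]
  simp
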